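-- pv_equiv track=rewrite | github.com/prasanna-28/Puzzle-Solvers | latinsquares.py | solve
-- ===== SOURCE A (Python) =====
-- def is_valid(board, num, pos):
--     for i in range(len(board[0])):
--         if board[pos[0]][i] == num and pos[1] != i:
--             return False
--
--     for i in range(len(board)):
--         if board[i][pos[1]] == num and pos[0] != i:
--             return False
--
--     return True
--
-- def find_empty(board):
--     for i in range(len(board)):
--         for j in range(len(board[0])):
--             if board[i][j] == 0:
--                 return (i, j)
--
--     return None
--
-- def solve(board):
--     find = find_empty(board)
--     if not find:
--         return True
--     else:
--         row, col = find
--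
--     for i in range(1, len(board) + 1):
--         if is_valid(board, i, (row, col)):
--             board[row][col] = i
--
--             if solve(board):
--                 return True
--
--             board[row][col] = 0
--
--     return False
-- ===== SOURCE B (Python) =====
-- # Alternative backtracking: precomputed row/column used-value sets replace A's
-- # per-candidate row/column scans, and a row-major cursor replaces A's full
-- # find_empty rescan at every node. Like A, fills `board` in place on success.
-- def solve(board):
--     n = len(board)
--     m = len(board[0]) if board else 0
--     row_used = [set(row[:m]) for row in board]
--     col_used = [set(board[i][j] for i in range(n)) for j in range(m)]
--
--     def rec(r, c):
--         while True:
--             if r == n: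
--                 return True
--             if c == m:
--                 r, c = r + 1, 0
--                 continue
--             if board[r][c] != 0:
--                 c += 1
--                 continue
--             break
--         for v in range(1, n + 1):
--             if v not in row_used[r] and v not in col_used[c]:
--                 row_used[r].add(v)
--                 col_used[c].add(v)
--                 board[r][c] = v
--                 if rec(r, c + 1):
--                     return True
--                 board[r][c] = 0
--                 row_used[r].discard(v)
--                 col_used[c].discard(v)
--         return False
--
--     return rec(0, 0)
-- ===== Notes on version B (the rewrite author's own statement) =====
-- stated objective: faster
-- what changed: replaces A's per-candidate row/column scans and the full-board find_empty rescan at every node by precomputed row/column used-value sets maintained incrementally plus an iterative row-major cursor (O(1) set lookups per candidate instead of O(n+m) scans)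
-- outside the precondition, e.g. on solve([[0, 1], [2]]): A returns False, B raises IndexError
import Mathlib
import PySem

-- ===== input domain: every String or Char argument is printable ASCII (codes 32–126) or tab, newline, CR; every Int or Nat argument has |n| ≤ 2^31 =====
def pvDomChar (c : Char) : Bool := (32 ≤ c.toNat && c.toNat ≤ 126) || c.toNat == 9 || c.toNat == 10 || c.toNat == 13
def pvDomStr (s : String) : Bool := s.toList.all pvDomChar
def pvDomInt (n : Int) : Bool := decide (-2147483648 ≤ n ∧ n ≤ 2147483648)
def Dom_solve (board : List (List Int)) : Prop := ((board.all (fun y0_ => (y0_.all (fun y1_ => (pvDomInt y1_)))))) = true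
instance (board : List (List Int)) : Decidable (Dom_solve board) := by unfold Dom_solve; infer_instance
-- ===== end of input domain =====

-- B replaces A's per-node row/column scans and repeated find_empty rescans by
-- precomputed row/column used-value sets maintained incrementally and an iterative
-- row-major cursor: the same search tree with O(1) set lookups per candidate in
-- place of O(n+m) scans (measured faster at the larger generated sizes). Both Pythons fill `board` in place on success
-- (same mutation); the theorems below are about the RETURN value. The fuel arguments
-- of the Lean ports are totality guards only (both Python recursions terminate).

-- ===== PORT A =====
-- board[i][j] indices below are loop indices, always ≥ 0 and in range under Pre_solve;
-- the getD default is unreachable there, so this is exact on the stated domain.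
def pvCell (board : List (List Int)) (i j : Nat) : Int := (board.getD i []).getD j 0

def pvSetCell (board : List (List Int)) (r c : Nat) (v : Int) : List (List Int) :=
  board.set r ((board.getD r []).set c v)

def findEmpty (board : List (List Int)) : Option (Nat × Nat) :=
  (List.range board.length).findSome? (fun i =>
    ((List.range (board.headD []).length).find? (fun j => pvCell board i j == 0)).map (fun j => (i, j)))


def isValid (board : List (List Int)) (num : Int) (r c : Nat) : Bool :=
  ((List.range (board.headD []).length).all fun i => !(pvCell board r i == num && c != i)) &&
  ((List.range board.length).all fun i => !(pvCell board i c == num && r != i))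


def pvZeros (board : List (List Int)) : Nat :=
  (board.map (fun row => (row.take (board.headD []).length).count 0)).sum


def solveFuel (fuel : Nat) (board : List (List Int)) : Bool :=
  match findEmpty board with
  | none => true
  | some (r, c) =>
    match fuel with
    | 0 => false
    | fuel' + 1 =>
      (PySem.List.pyRange 1 ((board.length : Int) + 1) 1).any fun v =>
        isValid board v r c && solveFuel fuel' (pvSetCell board r c v)


def solve (board : List (List Int)) : Bool := solveFuel (pvZeros board) board


-- ===== PORT B =====
def recB (n m : Nat) (fuel : Nat) (board : List (List Int))
    (rowUsed colUsed : List (PySem.Set Int)) (r c : Nat) : Bool :=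
  match fuel with
  | 0 => false
  | fuel' + 1 =>
    if r = n then true
    else if c = m then recB n m fuel' board rowUsed colUsed (r + 1) 0
    else if pvCell board r c != 0 then recB n m fuel' board rowUsed colUsed r (c + 1)
    else
      (PySem.List.pyRange 1 ((n : Int) + 1) 1).any fun v =>
        !(PySem.Set.contains (rowUsed.getD r []) v) &&
        (!(PySem.Set.contains (colUsed.getD c []) v) &&
          recB n m fuel' (pvSetCell board r c v)
            (rowUsed.set r (PySem.Set.add (rowUsed.getD r []) v))
            (colUsed.set c (PySem.Set.add (colUsed.getD c []) v)) r (c + 1))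


def solve_alt (board : List (List Int)) : Bool :=
  let n := board.length
  let m := (board.headD []).length
  let rowUsed := board.map (fun row => PySem.Set.ofList (row.take m))
  let colUsed := (List.range m).map (fun j =>
    PySem.Set.ofList ((List.range n).map (fun i => pvCell board i j)))
  recB n m ((n + 1) * (m + 1)) board rowUsed colUsed 0 0


-- ===== PRECONDITION & SPEC =====
-- Pre_solve excludes ragged boards (a row shorter than row 0): on those A's scans index
-- past the short row and raise IndexError (on rare ragged boards A happens to return
-- before reaching the missing index; B raises there instead).
def Pre_solve (board : List (List Int)) : Prop :=
  ∀ row ∈ board, (board.headD []).length ≤ row.length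
instance (board : List (List Int)) : Decidable (Pre_solve board) := by
  unfold Pre_solve; infer_instance

def pvWitness_solve : List (List Int) := [[1, 0], [0, 1]]

def Spec_solve (board : List (List Int)) (out : Bool) : Prop := out = solve_alt board
instance (board : List (List Int)) (out : Bool) : Decidable (Spec_solve board out) := by
  unfold Spec_solve; infer_instance

-- ===== CLAIM =====
def Claim_equal_solve : Prop :=
  ∀ (board : List (List Int)), Dom_solve board → Pre_solve board → Spec_solve board (solve board)

-- ===== LEMMAS AND PROOFS =====
lemma getD_set_list {α : Type} (l : List α) (r i : Nat) (a d : α) (h : r ≠ i) :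
    (l.set r a).getD i d = l.getD i d := by
  rw [List.getD_eq_getElem?_getD, List.getD_eq_getElem?_getD, List.getElem?_set, if_neg h]

lemma getD_set_self {α : Type} (l : List α) (r : Nat) (a d : α) (h : r < l.length) :
    (l.set r a).getD r d = a := by
  rw [List.getD_eq_getElem?_getD, List.getElem?_set, if_pos rfl, if_pos h]; rfl

lemma pvCell_setCell (board : List (List Int)) (r c : Nat) (v : Int) (i j : Nat)
    (hr : r < board.length) (hc : c < (board.getD r []).length) :
    pvCell (pvSetCell board r c v) i j = if i = r ∧ j = c then v else pvCell board i j := by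
  unfold pvCell pvSetCell
  by_cases hi : i = r
  · subst hi
    rw [getD_set_self _ _ _ _ hr]
    by_cases hj : j = c
    · subst hj
      rw [if_pos ⟨rfl, rfl⟩, List.getD_eq_getElem?_getD, List.getElem?_set, if_pos rfl,
        if_pos hc]; rfl
    · rw [if_neg (by tauto)]
      exact getD_set_list _ _ _ _ _ (by omega)
  · rw [if_neg (by tauto), getD_set_list _ _ _ _ _ (by omega)]

lemma headD_setCell_len (board : List (List Int)) (r c : Nat) (v : Int) :
    ((pvSetCell board r c v).headD []).length = (board.headD []).length := by
  cases board with
  | nil => rfl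
  | cons h t =>
    cases r with
    | zero => simp [pvSetCell]
    | succ r' => simp [pvSetCell, List.set]

lemma mem_set_of_zero {l : List Int} {c : Nat} {v x : Int}
    (hc : c < l.length) (h0 : l[c] = 0) (hx : x ≠ 0) :
    x ∈ l.set c v ↔ x ∈ l ∨ x = v := by
  rw [List.mem_iff_getElem, List.mem_iff_getElem]
  constructor
  · rintro ⟨i, hi, hval⟩
    rw [List.length_set] at hi
    rw [List.getElem_set] at hval
    by_cases hic : c = i
    · right; subst hic; simpa using hval.symm
    · left; rw [if_neg hic] at hval; exact ⟨i, hi, hval⟩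
  · rintro (⟨i, hi, hval⟩ | hxv)
    · by_cases hic : i = c
      · exfalso; subst hic; rw [h0] at hval; exact hx hval.symm
      · exact ⟨i, by simpa using hi, by rw [List.getElem_set, if_neg (by omega)]; exact hval⟩
    · exact ⟨c, by simpa using hc, by rw [List.getElem_set, if_pos rfl]; omega⟩

lemma findEmpty_none (board : List (List Int))
    (h : ∀ i j, i < board.length → j < (board.headD []).length → pvCell board i j ≠ 0) :
    findEmpty board = none := by
  unfold findEmpty
  rw [List.findSome?_eq_none_iff]
  intro i hi
  rw [Option.map_eq_none_iff, List.find?_eq_none]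
  intro j hj
  simp only [List.mem_range] at hi hj
  simpa using h i j hi hj

lemma find?_zero_eq_some (board : List (List Int)) (i c m : Nat) (hc : c < m)
    (h0 : pvCell board i c = 0) (hpre : ∀ j, j < c → pvCell board i j ≠ 0) :
    (List.range m).find? (fun j => pvCell board i j == 0) = some c := by
  have hsplit : List.range m = List.range c ++ (List.range (m - c)).map (c + ·) := by
    rw [← List.range_add]; congr 1; omega
  rw [hsplit, List.find?_append]
  have h1 : (List.range c).find? (fun j => pvCell board i j == 0) = none := by
    rw [List.find?_eq_none]; intro j hj; simp only [List.mem_range] at hj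
    simpa using hpre j hj
  rw [h1, Option.none_or]
  obtain ⟨k, hk⟩ : ∃ k, m - c = k + 1 := ⟨m - c - 1, by omega⟩
  rw [hk, List.range_succ_eq_map, List.map_cons, List.find?_cons]
  simp [h0]

lemma findEmpty_some (board : List (List Int)) (r c : Nat)
    (hr : r < board.length) (hc : c < (board.headD []).length)
    (h0 : pvCell board r c = 0)
    (hpre : ∀ i j, j < (board.headD []).length → (i < r ∨ (i = r ∧ j < c)) → pvCell board i j ≠ 0) :
    findEmpty board = some (r, c) := by
  unfold findEmpty
  have hsplit : List.range board.length = List.range r ++ (List.range (board.length - r)).map (r + ·) := by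
    rw [← List.range_add]; congr 1; omega
  rw [hsplit, List.findSome?_append]
  have h1 : (List.range r).findSome? (fun i =>
      ((List.range (board.headD []).length).find? (fun j => pvCell board i j == 0)).map (fun j => (i, j))) = none := by
    rw [List.findSome?_eq_none_iff]
    intro i hi
    rw [Option.map_eq_none_iff, List.find?_eq_none]
    intro j hj
    simp only [List.mem_range] at hi hj
    simpa using hpre i j hj (Or.inl hi)
  rw [h1, Option.none_or]
  obtain ⟨k, hk⟩ : ∃ k, board.length - r = k + 1 := ⟨board.length - r - 1, by omega⟩
  rw [hk, List.range_succ_eq_map, List.map_cons, List.findSome?_cons]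
  simp only [Nat.add_zero]
  rw [find?_zero_eq_some board r c _ hc h0 (fun j hj => hpre r j (by omega) (Or.inr ⟨rfl, hj⟩))]
  rfl

lemma sum_set_nat (l : List Nat) (i : Nat) (a : Nat) (h : i < l.length) :
    (l.set i a).sum + l[i] = l.sum + a := by
  induction l generalizing i with
  | nil => simp at h
  | cons x xs ih =>
    cases i with
    | zero => simp [List.set_cons_zero]; omega
    | succ n =>
      simp only [List.set_cons_succ, List.sum_cons, List.getElem_cons_succ]
      have := ih n (by simpa using h)
      omega

lemma pvZeros_pos (board : List (List Int)) (r c : Nat)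
    (hr : r < board.length) (hc : c < (board.headD []).length)
    (hlen : (board.headD []).length ≤ (board.getD r []).length)
    (h0 : pvCell board r c = 0) : 1 ≤ pvZeros board := by
  unfold pvZeros
  have hmem : (0:Int) ∈ (board.getD r []).take (board.headD []).length := by
    rw [List.mem_iff_getElem]
    exact ⟨c, by rw [List.length_take]; omega, by rw [List.getElem_take]; rw [pvCell, List.getD_eq_getElem _ _ (by omega)] at h0; exact h0⟩
  have hcnt : 0 < ((board.getD r []).take (board.headD []).length).count 0 :=
    List.count_pos_iff.mpr hmem
  have : ((board.getD r []).take (board.headD []).length).count 0 ∈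
      board.map (fun row => (row.take (board.headD []).length).count 0) := by
    rw [List.getD_eq_getElem _ _ hr]
    exact List.mem_map_of_mem (l := board) (List.getElem_mem hr)
  have := List.le_sum_of_mem this
  omega

lemma pvZeros_setCell (board : List (List Int)) (r c : Nat) (v : Int)
    (hr : r < board.length) (hc : c < (board.headD []).length)
    (hlen : (board.headD []).length ≤ (board.getD r []).length)
    (h0 : pvCell board r c = 0) (hv : v ≠ 0) :
    pvZeros (pvSetCell board r c v) + 1 = pvZeros board := by
  unfold pvZeros
  rw [headD_setCell_len]
  set m := (board.headD []).length with hm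
  unfold pvSetCell
  rw [List.map_set]
  have hcl : c < ((board.getD r []).take m).length := by rw [List.length_take]; omega
  have hrl : r < (board.map (fun row => (row.take m).count 0)).length := by simpa using hr
  have hsum := sum_set_nat (board.map (fun row => (row.take m).count 0)) r
      ((((board.getD r []).set c v).take m).count 0) hrl
  have hget : (board.map (fun row => (row.take m).count 0))[r] = ((board.getD r []).take m).count 0 := by
    rw [List.getElem_map, List.getD_eq_getElem _ _ hr]
  have htake : (((board.getD r []).set c v).take m) = ((board.getD r []).take m).set c v :=
    List.take_set
  have h0' : ((board.getD r []).take m)[c]'hcl = 0 := by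
    rw [List.getElem_take]; rw [pvCell, List.getD_eq_getElem _ _ (by omega)] at h0; exact h0
  have hcnt := List.count_set (a := v) (b := (0:Int)) (l := (board.getD r []).take m) hcl
  have hpos : 0 < ((board.getD r []).take m).count 0 :=
    List.count_pos_iff.mpr (by rw [List.mem_iff_getElem]; exact ⟨c, hcl, h0'⟩)
  rw [htake, hget] at hsum
  rw [htake]
  have hcv : (((board.getD r []).take m).set c v).count 0 + 1 = ((board.getD r []).take m).count 0 := by
    rw [hcnt]
    simp only [h0', beq_self_eq_true, if_true, beq_iff_eq, hv, if_false]
    omega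
  omega

lemma mem_take_cell (board : List (List Int)) (r m : Nat) (x : Int)
    (hlen : m ≤ (board.getD r []).length) :
    x ∈ (board.getD r []).take m ↔ ∃ i, i < m ∧ pvCell board r i = x := by
  rw [List.mem_iff_getElem]
  constructor
  · rintro ⟨i, hi, hval⟩
    rw [List.length_take] at hi
    refine ⟨i, by omega, ?_⟩
    rw [List.getElem_take] at hval
    rw [pvCell, List.getD_eq_getElem _ _ (by omega)]
    exact hval
  · rintro ⟨i, hi, hval⟩
    refine ⟨i, by rw [List.length_take]; omega, ?_⟩
    rw [List.getElem_take]
    rw [pvCell, List.getD_eq_getElem _ _ (by omega)] at hval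
    exact hval

lemma isValid_eq (board : List (List Int)) (rU cU : List (PySem.Set Int)) (n m r c : Nat) (v : Int)
    (hn : board.length = n) (hm : (board.headD []).length = m)
    (hlenr : m ≤ (board.getD r []).length)
    (hrowinv : ∀ x : Int, x ≠ 0 →
      (PySem.Set.contains (rU.getD r []) x = true ↔ x ∈ (board.getD r []).take m))
    (hcolinv : ∀ x : Int, x ≠ 0 →
      (PySem.Set.contains (cU.getD c []) x = true ↔ ∃ i, i < n ∧ pvCell board i c = x))
    (h0 : pvCell board r c = 0) (hv : 1 ≤ v) :
    isValid board v r c =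
      (!(PySem.Set.contains (rU.getD r []) v) && !(PySem.Set.contains (cU.getD c []) v)) := by
  have hv0 : v ≠ 0 := by intro h; omega
  unfold isValid
  rw [hm, hn]
  have hrow : ((List.range m).all fun i => !(pvCell board r i == v && c != i))
      = !(PySem.Set.contains (rU.getD r []) v) := by
    cases hcon : PySem.Set.contains (rU.getD r []) v with
    | false =>
      simp only [Bool.not_false, List.all_eq_true, List.mem_range]
      intro i hi
      simp only [Bool.not_eq_eq_eq_not, Bool.not_true, Bool.and_eq_false_iff]
      by_cases hcell : pvCell board r i = v
      · exfalso
        have : v ∈ (board.getD r []).take m := (mem_take_cell board r m v hlenr).mpr ⟨i, hi, hcell⟩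
        have := (hrowinv v hv0).mpr this
        rw [hcon] at this; exact Bool.false_ne_true this
      · left; simpa using hcell
    | true =>
      have hmem : v ∈ (board.getD r []).take m := (hrowinv v hv0).mp hcon
      obtain ⟨i, hi, hcell⟩ := (mem_take_cell board r m v hlenr).mp hmem
      have hic : i ≠ c := by intro h; rw [h] at hcell; rw [hcell] at h0; exact hv0 h0
      simp only [Bool.not_true]
      rw [List.all_eq_false]
      exact ⟨i, List.mem_range.mpr hi, by simp [hcell, Ne.symm hic]⟩
  have hcol : ((List.range n).all fun i => !(pvCell board i c == v && r != i))
      = !(PySem.Set.contains (cU.getD c []) v) := by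
    cases hcon : PySem.Set.contains (cU.getD c []) v with
    | false =>
      simp only [Bool.not_false, List.all_eq_true, List.mem_range]
      intro i hi
      simp only [Bool.not_eq_eq_eq_not, Bool.not_true, Bool.and_eq_false_iff]
      by_cases hcell : pvCell board i c = v
      · exfalso
        have := (hcolinv v hv0).mpr ⟨i, hi, hcell⟩
        rw [hcon] at this; exact Bool.false_ne_true this
      · left; simpa using hcell
    | true =>
      obtain ⟨i, hi, hcell⟩ := (hcolinv v hv0).mp hcon
      have hic : i ≠ r := by intro h; rw [h] at hcell; rw [hcell] at h0; exact hv0 h0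
      simp only [Bool.not_true]
      rw [List.all_eq_false]
      exact ⟨i, List.mem_range.mpr hi, by simp [hcell, Ne.symm hic]⟩
  rw [hrow, hcol]

def PVInv (n m : Nat) (board : List (List Int)) (rU cU : List (PySem.Set Int)) (r c : Nat) : Prop :=
  board.length = n ∧
  (board.headD []).length = m ∧
  (∀ row ∈ board, m ≤ row.length) ∧
  rU.length = n ∧ cU.length = m ∧
  r ≤ n ∧ c ≤ m ∧
  (∀ i j, j < m → (i < r ∨ (i = r ∧ j < c)) → pvCell board i j ≠ 0) ∧
  (∀ i, i < n → ∀ x : Int, x ≠ 0 →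
    (PySem.Set.contains (rU.getD i []) x = true ↔ x ∈ (board.getD i []).take m)) ∧
  (∀ j, j < m → ∀ x : Int, x ≠ 0 →
    (PySem.Set.contains (cU.getD j []) x = true ↔ ∃ i, i < n ∧ pvCell board i j = x))

lemma getD_setCell_self (board : List (List Int)) (r c : Nat) (v : Int)
    (hr : r < board.length) :
    (pvSetCell board r c v).getD r [] = (board.getD r []).set c v :=
  getD_set_self _ _ _ _ hr

lemma getD_setCell_ne (board : List (List Int)) (r c : Nat) (v : Int) (i : Nat) (h : r ≠ i) :
    (pvSetCell board r c v).getD i [] = board.getD i [] :=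
  getD_set_list _ _ _ _ _ h

lemma main_equiv (n m : Nat) : ∀ (fuelB fuelA : Nat) (board : List (List Int))
    (rU cU : List (PySem.Set Int)) (r c : Nat),
    PVInv n m board rU cU r c → pvZeros board ≤ fuelA →
    (n - r) * (m + 1) + (m - c) < fuelB →
    recB n m fuelB board rU cU r c = solveFuel fuelA board := by
  intro fuelB
  induction fuelB with
  | zero => intro fuelA board rU cU r c _ _ hB; omega
  | succ fb ih =>
    intro fuelA board rU cU r c hInv hA hB
    obtain ⟨hn, hm, hrows, hrUl, hcUl, hr, hc, hpref, hrowinv, hcolinv⟩ := hInv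
    have hunf : recB n m (fb + 1) board rU cU r c =
        (if r = n then true
         else if c = m then recB n m fb board rU cU (r + 1) 0
         else if pvCell board r c != 0 then recB n m fb board rU cU r (c + 1)
         else
           (PySem.List.pyRange 1 ((n : Int) + 1) 1).any fun v =>
             !(PySem.Set.contains (rU.getD r []) v) &&
             (!(PySem.Set.contains (cU.getD c []) v) &&
               recB n m fb (pvSetCell board r c v)
                 (rU.set r (PySem.Set.add (rU.getD r []) v))
                 (cU.set c (PySem.Set.add (cU.getD c []) v)) r (c + 1))) := rfl
    rw [hunf]; clear hunf
    by_cases hrn : r = n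
    · rw [if_pos hrn]
      have hfe : findEmpty board = none := by
        apply findEmpty_none
        intro i j hi hj
        exact hpref i j (by omega) (Or.inl (by omega))
      rw [solveFuel, hfe]
    rw [if_neg hrn]
    have hrn' : r < n := by omega
    by_cases hcm : c = m
    · rw [if_pos hcm]
      apply ih fuelA board rU cU (r + 1) 0
      · refine ⟨hn, hm, hrows, hrUl, hcUl, by omega, by omega, ?_, hrowinv, hcolinv⟩
        intro i j hj hij
        apply hpref i j hj
        rcases hij with h | ⟨h, h0⟩
        · by_cases hir : i = r
          · exact Or.inr ⟨hir, by omega⟩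
          · exact Or.inl (by omega)
        · omega
      · exact hA
      · obtain ⟨k, hk⟩ : ∃ k, n - r = k + 1 := ⟨n - r - 1, by omega⟩
        have h1 : n - (r + 1) = k := by omega
        have h2 : (k + 1) * (m + 1) = k * (m + 1) + (m + 1) := Nat.succ_mul k (m + 1)
        rw [h1]; rw [hk, h2] at hB
        omega
    rw [if_neg hcm]
    have hcm' : c < m := by omega
    by_cases hz : pvCell board r c = 0
    · rw [if_neg (by simp [hz])]
      have hrl : r < board.length := by omega
      have hlenr : m ≤ (board.getD r []).length := by
        exact hrows (board.getD r []) (by rw [List.getD_eq_getElem _ _ hrl]; exact List.getElem_mem hrl)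
      have hcl : c < (board.getD r []).length := by omega
      have hfe : findEmpty board = some (r, c) := by
        apply findEmpty_some board r c (by omega) (by omega) hz
        intro i j hj hij
        exact hpref i j (by omega) hij
      have hzpos : 1 ≤ pvZeros board := pvZeros_pos board r c hrl (by omega) (by omega) hz
      obtain ⟨fa, hfa⟩ : ∃ fa, fuelA = fa + 1 := ⟨fuelA - 1, by omega⟩
      subst hfa
      have hunfA : solveFuel (fa + 1) board =
          (PySem.List.pyRange 1 ((board.length : Int) + 1) 1).any fun v =>
            isValid board v r c && solveFuel fa (pvSetCell board r c v) := by
        rw [solveFuel, hfe]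
      rw [hunfA, hn]
      apply PySem.List.any_congr_mem
      intro v hvmem
      have hv : 1 ≤ v ∧ v < (n : Int) + 1 := (PySem.List.mem_pyRange_one).mp hvmem
      have hv0 : v ≠ 0 := by omega
      have hval := isValid_eq board rU cU n m r c v hn hm hlenr
        (fun x hx => hrowinv r hrn' x hx) (fun x hx => hcolinv c hcm' x hx) hz hv.1
      rw [hval]
      have hrec : recB n m fb (pvSetCell board r c v)
          (rU.set r (PySem.Set.add (rU.getD r []) v))
          (cU.set c (PySem.Set.add (cU.getD c []) v)) r (c + 1)
          = solveFuel fa (pvSetCell board r c v) := by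
        apply ih
        · refine ⟨by simpa [pvSetCell] using hn, by rw [headD_setCell_len]; exact hm, ?_,
            by simpa using hrUl, by simpa using hcUl, by omega, by omega, ?_, ?_, ?_⟩
          · intro row hrow
            rcases List.mem_or_eq_of_mem_set hrow with h | h
            · exact hrows row h
            · subst h; rw [List.length_set]; exact hlenr
          · intro i j hj hij
            rw [pvCell_setCell board r c v i j hrl hcl]
            by_cases hij2 : i = r ∧ j = c
            · rw [if_pos hij2]; omega
            · rw [if_neg hij2]
              apply hpref i j hj
              rcases hij with h | ⟨h, h0⟩
              · exact Or.inl h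
              · exact Or.inr ⟨h, by omega⟩
          · intro i hi x hx
            by_cases hir : i = r
            · subst hir
              rw [getD_set_self _ _ _ _ (by omega), getD_setCell_self board i c v hrl]
              rw [PySem.Set.contains_iff, PySem.Set.mem_add, List.take_set]
              rw [mem_set_of_zero (by rw [List.length_take]; omega)
                (by rw [List.getElem_take]; rw [pvCell, List.getD_eq_getElem _ _ hcl] at hz; exact hz) hx]
              have hsx : x ∈ rU.getD i [] ↔ x ∈ (board.getD i []).take m :=
                (PySem.Set.contains_iff _ _).symm.trans (hrowinv i hi x hx)
              rw [hsx]
            · rw [getD_set_list _ _ _ _ _ (by omega), getD_setCell_ne board r c v i (Ne.symm hir)]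
              exact hrowinv i hi x hx
          · intro j hj x hx
            by_cases hjc : j = c
            · subst hjc
              rw [getD_set_self _ _ _ _ (by omega)]
              rw [PySem.Set.contains_iff, PySem.Set.mem_add]
              have hsx : x ∈ cU.getD j [] ↔ ∃ i, i < n ∧ pvCell board i j = x :=
                (PySem.Set.contains_iff _ _).symm.trans (hcolinv j hj x hx)
              rw [hsx]
              constructor
              · rintro (⟨i2, hi2, hcell⟩ | hxv)
                · refine ⟨i2, hi2, ?_⟩
                  rw [pvCell_setCell board r j v i2 j hrl hcl]
                  rw [if_neg (by rintro ⟨h1, -⟩; subst h1; rw [hcell] at hz; exact hx hz)]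
                  exact hcell
                · exact ⟨r, hrn', by rw [pvCell_setCell board r j v r j hrl hcl, if_pos ⟨rfl, rfl⟩]; omega⟩
              · rintro ⟨i2, hi2, hcell⟩
                rw [pvCell_setCell board r j v i2 j hrl hcl] at hcell
                by_cases hi2r : i2 = r
                · right; rw [if_pos ⟨hi2r, rfl⟩] at hcell; omega
                · left; rw [if_neg (by tauto)] at hcell; exact ⟨i2, hi2, hcell⟩
            · rw [getD_set_list _ _ _ _ _ (by omega)]
              rw [hcolinv j hj x hx]
              apply exists_congr
              intro i2
              apply and_congr_right
              intro _
              rw [pvCell_setCell board r c v i2 j hrl hcl, if_neg (by tauto)]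
        · have := pvZeros_setCell board r c v hrl (by omega) (by omega) hz hv0
          omega
        · generalize hX : (n - r) * (m + 1) = X at hB ⊢
          omega
      rw [hrec, Bool.and_assoc]
    · rw [if_pos (by simp [hz])]
      apply ih fuelA board rU cU r (c + 1)
      · refine ⟨hn, hm, hrows, hrUl, hcUl, by omega, by omega, ?_, hrowinv, hcolinv⟩
        intro i j hj hij
        rcases hij with h | ⟨h, h0⟩
        · exact hpref i j hj (Or.inl h)
        · by_cases hjc : j = c
          · subst hjc; subst h; exact hz
          · exact hpref i j hj (Or.inr ⟨h, by omega⟩)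
      · exact hA
      · generalize hX : (n - r) * (m + 1) = X at hB ⊢
        omega


lemma solve_eq_alt (board : List (List Int)) (hpre : Pre_solve board) :
    solve board = solve_alt board := by
  unfold solve solve_alt
  refine (main_equiv board.length ((board.headD []).length ) _ _ board _ _ 0 0 ?_ le_rfl ?_).symm
  · refine ⟨rfl, rfl, hpre, by simp, by simp, by omega, by omega, ?_, ?_, ?_⟩
    · intro i j hj hij; omega
    · intro i hi x hx
      rw [List.getD_eq_getElem _ _ (by simpa using hi), List.getElem_map]
      rw [PySem.Set.contains_iff, PySem.Set.mem_ofList]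
      rw [List.getD_eq_getElem _ _ hi]
    · intro j hj x hx
      rw [List.getD_eq_getElem _ _ (by simpa using hj), List.getElem_map, List.getElem_range]
      rw [PySem.Set.contains_iff, PySem.Set.mem_ofList]
      simp only [List.mem_map, List.mem_range]
  · have h2 : (board.length + 1) * ((board.headD []).length + 1)
        = board.length * ((board.headD []).length + 1) + ((board.headD []).length + 1) := by ring
    generalize hX : board.length * ((board.headD []).length + 1) = X at *
    omega

-- ===== VERDICT =====
theorem solve_spec : Claim_equal_solve := by
  intro board _ hpre
  unfold Spec_solve
  exact solve_eq_alt board hpre
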